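-- pv_equiv track=rewrite | github.com/TomasWard1/python | teoricas/clase19.py | recitar
-- ===== SOURCE A (Python) =====
-- from typing import Tuple, Set, Dict
--
-- def recitar(n: int) -> str:
--     '''
--     Requiere: n >= 0
--     Devuelve: un string con la recitación de los dígitos de n,
--     en minúsculas y separados por espacios en blanco.
--     Ejemplos: recitar(1234) --> 'uno dos tres cuatro'
--     recitar(0)-->'cero'
--     recitar(999)-->'nueve nueve nueve'
--     '''
--     numerosRecitados: Dict[str, str] = {
--         '0':'cero',
--         '1': 'uno',
--         '2': 'dos',
--         '3': 'tres',
--         '4': 'cuatro',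
--         '5': 'cinco',
--         '6': 'seis',
--         '7': 'siete',
--         '8': 'ocho',
--         '9': 'nueve',
--     }
--     recitacion:str = ''
--     for numero in str(n):
--         recitacion += (numerosRecitados[numero] + ' ')
--     return recitacion
-- ===== SOURCE B (Python) =====
-- def recitar(n: int) -> str:
--     palabras = ['cero', 'uno', 'dos', 'tres', 'cuatro',
--                 'cinco', 'seis', 'siete', 'ocho', 'nueve']
--     if n == 0:
--         return 'cero '
--     digitos = []
--     while n > 0:
--         digitos.append(palabras[n % 10])
--         n //= 10
--     return ' '.join(reversed(digitos)) + ' '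
-- ===== Notes on version B (the rewrite author's own statement) =====
-- stated objective: alternative
-- what changed: B extracts digits arithmetically (n % 10 / n //= 10 into a list, reversed and joined) instead of iterating the characters of str(n) with a char-to-word dict.
import Mathlib
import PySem

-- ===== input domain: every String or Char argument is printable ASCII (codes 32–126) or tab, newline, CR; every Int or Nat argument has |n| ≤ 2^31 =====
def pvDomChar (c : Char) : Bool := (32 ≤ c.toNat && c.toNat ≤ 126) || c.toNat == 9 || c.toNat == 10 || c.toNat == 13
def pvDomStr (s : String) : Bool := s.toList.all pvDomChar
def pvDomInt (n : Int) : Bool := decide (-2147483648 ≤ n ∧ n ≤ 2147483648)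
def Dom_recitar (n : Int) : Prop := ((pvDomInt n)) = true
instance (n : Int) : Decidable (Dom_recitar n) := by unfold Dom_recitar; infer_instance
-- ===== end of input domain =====

-- B spells the digits by arithmetic extraction (n % 10, n //= 10) instead of iterating str(n)
-- with a char-to-word dict; same output, including the trailing space (objective: alternative).

-- ===== PORT A =====
-- the literal dict numerosRecitados; Python's keys are the 1-char strings '0'..'9',
-- represented at the List-Char level by their single character (type convention)
def pvNumerosRecitados : PySem.Dict Char (List Char) :=
  PySem.Dict.ofList
    [('0', ['c','e','r','o']), ('1', ['u','n','o']), ('2', ['d','o','s']),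
     ('3', ['t','r','e','s']), ('4', ['c','u','a','t','r','o']), ('5', ['c','i','n','c','o']),
     ('6', ['s','e','i','s']), ('7', ['s','i','e','t','e']), ('8', ['o','c','h','o']),
     ('9', ['n','u','e','v','e'])]

-- for numero in str(n): recitacion += numerosRecitados[numero] + ' '
-- (the [] default stands for Python's KeyError: hit only for n < 0, excluded by Pre_)
def recitar (n : Int) : String :=
  String.ofList
    ((PySem.Int.toChars n).foldl
      (fun recitacion numero => recitacion ++ (PySem.Dict.getD pvNumerosRecitados numero [] ++ [' '])) [])

-- ===== PORT B =====
def pvPalabras : List (List Char) :=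
  [['c','e','r','o'], ['u','n','o'], ['d','o','s'], ['t','r','e','s'], ['c','u','a','t','r','o'],
   ['c','i','n','c','o'], ['s','e','i','s'], ['s','i','e','t','e'], ['o','c','h','o'],
   ['n','u','e','v','e']]

-- the while-loop of Source B: digitos.append(palabras[n % 10]); n //= 10   (least-significant first)
def pvDigitos (m : Nat) : List (List Char) :=
  if m = 0 then [] else pvPalabras.getD (m % 10) [] :: pvDigitos (m / 10)
decreasing_by exact Nat.div_lt_self (Nat.pos_of_ne_zero (by assumption)) (by omega)

-- ' '.join(reversed(digitos)) + ' '  ported via PySem.Chars.join (= PySem.Str.join)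
def recitar_alt (n : Int) : String :=
  if n = 0 then String.ofList ['c','e','r','o',' ']
  else String.ofList (PySem.Chars.join [' '] (pvDigitos n.toNat).reverse ++ [' '])

-- ===== PRECONDITION & SPEC =====
-- Pre_ excludes exactly n < 0, where A raises KeyError on the '-' character of str(n)
def Pre_recitar (n : Int) : Prop := 0 ≤ n
instance (n : Int) : Decidable (Pre_recitar n) := by unfold Pre_recitar; infer_instance
def pvWitness_recitar : Int := (1234)

def Spec_recitar (n : Int) (out : String) : Prop := out = recitar_alt n
instance (n : Int) (out : String) : Decidable (Spec_recitar n out) := by unfold Spec_recitar; infer_instance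

-- ===== CLAIM (what is proved, stated in full; the proofs are below) =====
def Claim_equal_recitar : Prop := ∀ (n : Int), Dom_recitar n → Pre_recitar n → Spec_recitar n (recitar n)

-- ===== LEMMAS AND PROOFS =====

-- the decimal digit characters of m, most-significant first (proof-only characterisation)
def pvChars (m : Nat) : List Char :=
  if m < 10 then [Nat.digitChar m] else pvChars (m / 10) ++ [Nat.digitChar (m % 10)]
decreasing_by exact Nat.div_lt_self (by omega) (by omega)

lemma pvChars_ne_nil (m : Nat) : pvChars m ≠ [] := by
  unfold pvChars; split <;> simp

lemma toDigitsCore_eq_pvChars : ∀ (f m : Nat) (l : List Char), m < f →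
    Nat.toDigitsCore 10 f m l = pvChars m ++ l := by
  intro f
  induction f with
  | zero => intro m l h; omega
  | succ f ih =>
    intro m l h
    by_cases h10 : m / 10 = 0
    · have hm : m < 10 := by omega
      rw [Nat.toDigitsCore, if_pos h10, pvChars, if_pos hm, Nat.mod_eq_of_lt hm]
      simp
    · have hm : ¬ m < 10 := by omega
      rw [Nat.toDigitsCore, if_neg h10, ih (m / 10) _ (by omega)]
      conv_rhs => rw [pvChars, if_neg hm]
      simp

lemma toChars_eq_pvChars (n : Int) (h : 0 ≤ n) :
    PySem.Int.toChars n = pvChars n.toNat := by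
  unfold PySem.Int.toChars
  rw [if_neg (by omega), Nat.toDigits]
  simpa using toDigitsCore_eq_pvChars (n.toNat + 1) n.toNat [] (by omega)

-- each digit's word: the list indexing of B agrees with the dict lookup of A
lemma pvWord_eq : ∀ d < 10, pvPalabras.getD d [] = PySem.Dict.getD pvNumerosRecitados (Nat.digitChar d) [] := by
  decide

-- B's collected words, reversed, are A's words of the digit characters
lemma pvDigitos_reverse (m : Nat) (hm : 0 < m) :
    (pvDigitos m).reverse = (pvChars m).map (fun c => PySem.Dict.getD pvNumerosRecitados c []) := by
  induction m using Nat.strong_induction_on with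
  | _ m ih =>
    rw [pvDigitos, if_neg (by omega)]
    by_cases h10 : m < 10
    · rw [pvDigitos, if_pos (by omega), pvChars, if_pos h10]
      have := pvWord_eq m h10
      simp only [List.reverse_cons, List.reverse_nil, List.nil_append, List.map_cons, List.map_nil]
      rw [Nat.mod_eq_of_lt h10, this]
    · rw [pvChars, if_neg h10]
      have hpos : 0 < m / 10 := Nat.div_pos (by omega) (by omega)
      have hlt : m / 10 < m := Nat.div_lt_self (by omega) (by omega)
      simp only [List.reverse_cons, List.map_append, List.map_cons, List.map_nil]
      rw [ih (m / 10) hlt hpos, pvWord_eq (m % 10) (Nat.mod_lt m (by omega))]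

-- ' '.join(ws) + ' ' concatenates each word followed by a space (ws nonempty)
lemma join_space (a : List Char) (ws : List (List Char)) :
    PySem.Chars.join [' '] (a :: ws) ++ [' '] = (a :: ws).flatMap (fun w => w ++ [' ']) := by
  induction ws generalizing a with
  | nil => simp [PySem.Chars.join_singleton]
  | cons b t ihb =>
    rw [PySem.Chars.join_cons_cons]
    simp only [List.flatMap_cons]
    rw [List.append_assoc, List.append_assoc, ihb b]
    simp

-- ===== VERDICT (by name: the statement is the Claim_ definition above) =====
theorem recitar_spec : Claim_equal_recitar := by
  intro n _ hpre
  unfold Pre_recitar at hpre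
  unfold Spec_recitar recitar recitar_alt
  rw [PySem.List.foldl_append_eq_flatMap, toChars_eq_pvChars n hpre]
  by_cases h0 : n = 0
  · subst h0
    rw [if_pos rfl]
    apply congrArg String.ofList
    rw [pvChars]
    decide
  · rw [if_neg h0]
    have hm : 0 < n.toNat := by omega
    obtain ⟨a, ws, hws⟩ : ∃ a ws, (pvDigitos n.toNat).reverse = a :: ws := by
      rcases hrev : (pvDigitos n.toNat).reverse with _ | ⟨a, ws⟩
      · exfalso
        have : pvChars n.toNat = [] := by
          have := pvDigitos_reverse n.toNat hm
          rw [hrev] at this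
          exact List.map_eq_nil_iff.mp this.symm
        exact pvChars_ne_nil _ this
      · exact ⟨a, ws, rfl⟩
    rw [hws, join_space, ← hws, pvDigitos_reverse n.toNat hm]
    simp [List.flatMap_map]
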